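-- pv_equiv track=rewrite | github.com/DucAnhValentinoNguyen/VL-Foundation-with-Surgeon-Level-Intellect | task5_expert_surgical_vlm/scripts/evaluation/evaluator.py | contains_uncertainty
-- ===== SOURCE A (Python) =====
-- def contains_uncertainty(text: str) -> bool:
--     text = text.lower()
--     uncertainty_terms = [
--         "uncertain",
--         "cannot be confirmed",
--         "not clearly identifiable",
--         "unclear",
--         "cannot determine",
--         "not visible",
--         "from this single frame",
--         "limited evidence",
--     ]
--     return any(term in text for term in uncertainty_terms)
-- ===== SOURCE B (Python) =====
-- def contains_uncertainty(text: str) -> bool: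
--     text = text.lower()
--     terms = (
--         "uncertain",
--         "cannot be confirmed",
--         "not clearly identifiable",
--         "unclear",
--         "cannot determine",
--         "not visible",
--         "from this single frame",
--         "limited evidence",
--     )
--     # single left-to-right scan: at each position, test whether some term starts there
--     for i in range(len(text) + 1):
--         if any(text.startswith(t, i) for t in terms):
--             return True
--     return False
-- ===== Notes on version B (the rewrite author's own statement) =====
-- stated objective: alternative
-- what changed: A loops over the eight phrases, each with its own full substring scan of the text; B makes a single left-to-right pass over the text, testing at each position whether any phrase starts there via startswith with an offset.
import Mathlib
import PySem

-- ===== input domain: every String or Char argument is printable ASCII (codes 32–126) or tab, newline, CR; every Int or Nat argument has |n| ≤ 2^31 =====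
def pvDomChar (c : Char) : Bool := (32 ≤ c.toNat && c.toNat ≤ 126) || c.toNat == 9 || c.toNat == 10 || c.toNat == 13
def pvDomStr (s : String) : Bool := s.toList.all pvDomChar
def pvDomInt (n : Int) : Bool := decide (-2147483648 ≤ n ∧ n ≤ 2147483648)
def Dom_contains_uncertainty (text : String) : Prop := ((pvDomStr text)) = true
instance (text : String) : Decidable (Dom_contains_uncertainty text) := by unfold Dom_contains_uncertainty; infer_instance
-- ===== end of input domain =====

-- B replaces A's eight independent 'term in text' substring scans by ONE left-to-right
-- scan of the text, testing at each position whether some term starts there (alternative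
-- decomposition, same asymptotic cost).

-- ===== PORT A =====
def pvTerms : List String :=
  ["uncertain", "cannot be confirmed", "not clearly identifiable", "unclear",
   "cannot determine", "not visible", "from this single frame", "limited evidence"]

def contains_uncertainty (text : String) : Bool :=
  let t := PySem.Str.lower text
  pvTerms.any (fun term => PySem.Str.isIn term t)

-- ===== PORT B =====
-- 'for i in range(len(text)+1): if any(text.startswith(t, i) ...)' as structural
-- recursion over the suffixes of the lowered text (one position per step).
def pvScan (terms : List String) : List Char → Bool
  | [] => terms.any (fun t => PySem.Chars.startswith [] t.toList)
  | c :: rest =>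
      (terms.any (fun t => PySem.Chars.startswith (c :: rest) t.toList)) || pvScan terms rest

def pvTermsB : List String :=
  ["uncertain", "cannot be confirmed", "not clearly identifiable", "unclear",
   "cannot determine", "not visible", "from this single frame", "limited evidence"]

def contains_uncertainty_alt (text : String) : Bool :=
  pvScan pvTermsB (PySem.Chars.lower text.toList)

-- ===== PRECONDITION & SPEC =====
def Spec_contains_uncertainty (text : String) (out : Bool) : Prop := out = contains_uncertainty_alt text
instance (text : String) (out : Bool) : Decidable (Spec_contains_uncertainty text out) := by unfold Spec_contains_uncertainty; infer_instance

-- ===== CLAIM (what is proved, stated in full; the proofs are below) =====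
def Claim_equal_contains_uncertainty : Prop := ∀ (text : String), Dom_contains_uncertainty text → Spec_contains_uncertainty text (contains_uncertainty text)

-- ===== LEMMAS AND PROOFS =====

-- B's scan finds a term iff some term is a prefix of some suffix.
theorem pvScan_eq_true_iff (terms : List String) (s : List Char) :
    pvScan terms s = true ↔ ∃ t ∈ terms, ∃ j, t.toList <+: s.drop j := by
  induction s with
  | nil =>
      simp [pvScan, List.any_eq_true, PySem.Chars.startswith_iff]
  | cons c rest ih =>
      simp only [pvScan, Bool.or_eq_true, List.any_eq_true, PySem.Chars.startswith_iff, ih]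
      constructor
      · rintro (⟨t, ht, hp⟩ | ⟨t, ht, j, hp⟩)
        · exact ⟨t, ht, 0, by simpa using hp⟩
        · exact ⟨t, ht, j + 1, by simpa using hp⟩
      · rintro ⟨t, ht, j, hp⟩
        cases j with
        | zero => exact Or.inl ⟨t, ht, by simpa using hp⟩
        | succ j => exact Or.inr ⟨t, ht, j, by simpa using hp⟩

-- A finds a term iff some term is an infix of the lowered text.
theorem containsA_iff (text : String) :
    contains_uncertainty text = true ↔
      ∃ t ∈ pvTerms, t.toList <:+: PySem.Chars.lower text.toList := by
  simp [contains_uncertainty, List.any_eq_true, PySem.Chars.isIn_iff_infix]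

-- ===== VERDICT (by name: the statement is the Claim_ definition above) =====
theorem contains_uncertainty_spec : Claim_equal_contains_uncertainty := by
  intro text _
  unfold Spec_contains_uncertainty
  have h : contains_uncertainty text = true ↔ contains_uncertainty_alt text = true := by
    rw [containsA_iff, contains_uncertainty_alt, pvScan_eq_true_iff]
    have hT : pvTermsB = pvTerms := rfl
    rw [hT]
    constructor
    · rintro ⟨t, ht, hinf⟩
      refine ⟨t, ht, ?_⟩
      have := (PySem.Chars.exists_prefix_drop_iff_isIn t.toList (PySem.Chars.lower text.toList)).mpr
        ((PySem.Chars.isIn_iff_infix _ _).mpr hinf)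
      exact this
    · rintro ⟨t, ht, hj⟩
      refine ⟨t, ht, ?_⟩
      exact (PySem.Chars.isIn_iff_infix _ _).mp
        ((PySem.Chars.exists_prefix_drop_iff_isIn t.toList (PySem.Chars.lower text.toList)).mp hj)
  cases hA : contains_uncertainty text <;> cases hB : contains_uncertainty_alt text <;>
    simp_all
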